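-- pv_equiv track=rewrite | github.com/djhedges/exit_speed | tire_temperature.py | FindTireIndex
-- ===== SOURCE A (Python) =====
-- def FindTireIndex(jumps) -> int:
--   first_jump = False
--   index = 0
--   for jump in jumps:
--     if jump:
--       first_jump = True
--     if not jump and first_jump:
--       return index
--     index += 1
--   return 0
-- ===== SOURCE B (Python) =====
-- def _runs(jumps):
--   # Run-length encode: list of [value, length] for maximal runs of equal truthiness.
--   runs = []
--   for j in jumps:
--     b = bool(j)
--     if runs and runs[-1][0] == b:
--       runs[-1][1] += 1
--     else:
--       runs.append([b, 1])
--   return runs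
--
--
-- def FindTireIndex(jumps) -> int:
--   # The first falsy element after a truthy one sits right after the first truthy
--   # run -- i.e. at the total length of all runs up to and including that run --
--   # and exists iff that run is not the last one.
--   runs = _runs(jumps)
--   offset = 0
--   for i, (k, n) in enumerate(runs):
--     offset += n
--     if k:
--       return offset if i + 1 < len(runs) else 0
--   return 0
-- ===== Notes on version B (the rewrite author's own statement) =====
-- stated objective: alternative
-- what changed: B first run-length-encodes the list into (value, length) runs, then answers from the run structure: the cumulative length up to and including the first truthy run, unless that run is the last (then 0), replacing A's flag-driven element-by-element scan.
import Mathlib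
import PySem

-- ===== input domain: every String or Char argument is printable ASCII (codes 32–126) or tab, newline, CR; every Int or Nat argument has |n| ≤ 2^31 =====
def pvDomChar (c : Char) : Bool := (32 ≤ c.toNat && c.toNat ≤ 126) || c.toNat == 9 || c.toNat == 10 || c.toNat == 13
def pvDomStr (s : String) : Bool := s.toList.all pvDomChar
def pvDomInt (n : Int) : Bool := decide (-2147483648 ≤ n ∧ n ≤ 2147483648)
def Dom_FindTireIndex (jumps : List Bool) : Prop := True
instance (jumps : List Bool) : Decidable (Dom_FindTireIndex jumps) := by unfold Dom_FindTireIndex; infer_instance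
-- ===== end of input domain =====

-- B replaces A's flag-driven element scan by a run-length encoding of the list followed
-- by a decision over the runs (alternative representation; same asymptotic cost).

-- ===== PORT A =====
-- A's single loop with the `first_jump` flag and running `index`.
def FindTireIndexLoop : List Bool → Bool → Int → Int
  | [], _, _ => 0
  | jump :: rest, firstJump, index =>
    let firstJump' := if jump then true else firstJump
    if !jump && firstJump' then index
    else FindTireIndexLoop rest firstJump' (index + 1)

def FindTireIndex (jumps : List Bool) : Int :=
  FindTireIndexLoop jumps false 0

-- ===== PORT B =====
-- Source B's `_runs` loop body: extend the last run or append a fresh one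
-- (the Python mutates runs[-1][1] in place; dropLast ++ [...] models exactly that).
def pvRunsStep (runs : List (Bool × Nat)) (b : Bool) : List (Bool × Nat) :=
  match runs.getLast? with
  | some (k, n) => if k == b then runs.dropLast ++ [(k, n + 1)] else runs ++ [(b, 1)]
  | none => [(b, 1)]

-- Source B's `_runs`: run-length encoding built left to right.
def pvRuns (jumps : List Bool) : List (Bool × Nat) :=
  jumps.foldl pvRunsStep []

-- Source B's main loop over the runs; `rest ≠ []` is Python's `i + 1 < len(runs)`.
def pvScanRuns : List (Bool × Nat) → Int → Int
  | [], _ => 0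
  | (k, n) :: rest, offset =>
    let offset' := offset + (n : Int)
    if k then (if rest ≠ [] then offset' else 0)
    else pvScanRuns rest offset'

def FindTireIndex_alt (jumps : List Bool) : Int :=
  pvScanRuns (pvRuns jumps) 0

-- ===== PRECONDITION & SPEC =====
def Spec_FindTireIndex (jumps : List Bool) (out : Int) : Prop := out = FindTireIndex_alt jumps
instance (jumps : List Bool) (out : Int) : Decidable (Spec_FindTireIndex jumps out) := by unfold Spec_FindTireIndex; infer_instance

-- ===== CLAIM (what is proved, stated in full; the proofs are below) =====
def Claim_equal_FindTireIndex : Prop := ∀ (jumps : List Bool), Dom_FindTireIndex jumps → Spec_FindTireIndex jumps (FindTireIndex jumps)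

-- ===== LEMMAS AND PROOFS =====

-- Front-recursive run-length encoding with a seed run, used to reason about the foldl.
def rleSeed (k : Bool) (n : Nat) : List Bool → List (Bool × Nat)
  | [] => [(k, n)]
  | b :: rest => if b = k then rleSeed k (n + 1) rest else (k, n) :: rleSeed b 1 rest

theorem rleSeed_ne_nil (k : Bool) (n : Nat) (l : List Bool) : rleSeed k n l ≠ [] := by
  induction l generalizing k n with
  | nil => simp [rleSeed]
  | cons b rest ih =>
    simp only [rleSeed]
    by_cases h : b = k
    · simpa [h] using ih k (n + 1)
    · simp [h]

-- pvRunsStep only inspects the last run, so a nonempty suffix absorbs the step.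
theorem pvRunsStep_append (rs s : List (Bool × Nat)) (hs : s ≠ []) (b : Bool) :
    pvRunsStep (rs ++ s) b = rs ++ pvRunsStep s b := by
  unfold pvRunsStep
  rw [List.getLast?_append_of_ne_nil rs hs]
  cases h : s.getLast? with
  | none => simp [List.getLast?_eq_none_iff] at h; exact absurd h hs
  | some p =>
    cases p with
    | mk k n =>
      by_cases hkb : k == b
      · simp [hkb, List.dropLast_append_of_ne_nil hs]
      · simp [hkb]

theorem foldl_pvRunsStep_append (l : List Bool) (rs s : List (Bool × Nat)) (hs : s ≠ []) :
    l.foldl pvRunsStep (rs ++ s) = rs ++ l.foldl pvRunsStep s := by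
  induction l generalizing s with
  | nil => simp
  | cons b rest ih =>
    simp only [List.foldl_cons]
    rw [pvRunsStep_append rs s hs b, ih]
    · unfold pvRunsStep
      cases h : s.getLast? with
      | none => simp [List.getLast?_eq_none_iff] at h; exact absurd h hs
      | some p =>
        cases p with
        | mk k n =>
          by_cases hkb : k == b <;> simp [hkb]

-- The foldl with a single seed run computes the front-recursive encoding.
theorem foldl_pvRunsStep_seed (l : List Bool) (k : Bool) (n : Nat) :
    l.foldl pvRunsStep ([(k, n)] : List (Bool × Nat)) = rleSeed k n l := by
  induction l generalizing k n with
  | nil => simp [rleSeed]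
  | cons b rest ih =>
    simp only [List.foldl_cons, rleSeed]
    by_cases h : b = k
    · have : pvRunsStep [(k, n)] b = [(k, n + 1)] := by simp [pvRunsStep, h]
      rw [this, ih, h]; simp
    · have hne : (k == b) = false := by simp [Ne.symm h]
      have : pvRunsStep [(k, n)] b = [(k, n)] ++ [(b, 1)] := by simp [pvRunsStep, hne]
      rw [this, foldl_pvRunsStep_append rest [(k, n)] [(b, 1)] (by simp), ih, if_neg h]; rfl

-- A's loop with the flag set vs B's scan resumed inside a truthy run of length n.
theorem loop_true_scan (l : List Bool) (n : Nat) (off : Int) :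
    FindTireIndexLoop l true (off + (n : Int)) = pvScanRuns (rleSeed true n l) off := by
  induction l generalizing n off with
  | nil => simp [FindTireIndexLoop, rleSeed, pvScanRuns]
  | cons b rest ih =>
    cases b with
    | true =>
      have e : FindTireIndexLoop (true :: rest) true (off + (n : Int))
          = FindTireIndexLoop rest true (off + (n : Int) + 1) := by
        simp [FindTireIndexLoop]
      rw [e]
      have : off + (n : Int) + 1 = off + ((n + 1 : Nat) : Int) := by push_cast; ring
      rw [this, ih]
      simp [rleSeed]
    | false =>
      have e : FindTireIndexLoop (false :: rest) true (off + (n : Int)) = off + (n : Int) := by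
        simp [FindTireIndexLoop]
      rw [e]
      simp [rleSeed, pvScanRuns, rleSeed_ne_nil]

-- A's loop with the flag unset vs B's scan inside a falsy run of length n.
theorem loop_false_scan (l : List Bool) (n : Nat) (off : Int) :
    FindTireIndexLoop l false (off + (n : Int)) = pvScanRuns (rleSeed false n l) off := by
  induction l generalizing n off with
  | nil => simp [FindTireIndexLoop, rleSeed, pvScanRuns]
  | cons b rest ih =>
    cases b with
    | true =>
      have e : FindTireIndexLoop (true :: rest) false (off + (n : Int))
          = FindTireIndexLoop rest true (off + (n : Int) + 1) := by
        simp [FindTireIndexLoop]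
      rw [e]
      have : off + (n : Int) + 1 = (off + (n : Int)) + ((1 : Nat) : Int) := by push_cast; ring
      rw [this, loop_true_scan rest 1 (off + (n : Int))]
      simp [rleSeed, pvScanRuns]
    | false =>
      have e : FindTireIndexLoop (false :: rest) false (off + (n : Int))
          = FindTireIndexLoop rest false (off + (n : Int) + 1) := by
        simp [FindTireIndexLoop]
      rw [e]
      have : off + (n : Int) + 1 = off + ((n + 1 : Nat) : Int) := by push_cast; ring
      rw [this, ih]
      simp [rleSeed]

-- ===== VERDICT (by name: the statement is the Claim_ definition above) =====
theorem FindTireIndex_spec : Claim_equal_FindTireIndex := by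
  intro jumps _
  unfold Spec_FindTireIndex FindTireIndex FindTireIndex_alt pvRuns
  cases jumps with
  | nil => simp [FindTireIndexLoop, pvScanRuns]
  | cons b rest =>
    have hfold : (b :: rest).foldl pvRunsStep ([] : List (Bool × Nat))
        = rleSeed b 1 rest := by
      simp only [List.foldl_cons]
      have : pvRunsStep [] b = [(b, 1)] := by simp [pvRunsStep]
      rw [this, foldl_pvRunsStep_seed]
    rw [hfold]
    cases b with
    | true =>
      have e : FindTireIndexLoop (true :: rest) false 0
          = FindTireIndexLoop rest true 1 := by simp [FindTireIndexLoop]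
      rw [e]
      have : (1 : Int) = 0 + ((1 : Nat) : Int) := by norm_num
      rw [this, loop_true_scan rest 1 0]
    | false =>
      have e : FindTireIndexLoop (false :: rest) false 0
          = FindTireIndexLoop rest false 1 := by simp [FindTireIndexLoop]
      rw [e]
      have : (1 : Int) = 0 + ((1 : Nat) : Int) := by norm_num
      rw [this, loop_false_scan rest 1 0]
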